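-- pv_equiv track=rewrite | github.com/eve-esa/data-processing | eve_pipeline/cleaning/processors.py | _has_unmatched_braces
-- ===== SOURCE A (Python) =====
-- def _has_unmatched_braces(formula: str) -> bool:
--     """Check for unmatched braces in formula."""
--     brace_count = 0
--     for char in formula:
--         if char == '{':
--             brace_count += 1
--         elif char == '}':
--             brace_count -= 1
--             if brace_count < 0:
--                 return True
--     return brace_count != 0
-- ===== SOURCE B (Python) =====
-- def _has_unmatched_braces(formula: str) -> bool:
--     """Check for unmatched braces in formula."""
--     braces = ''.join(c for c in formula if c in '{}')
--     while '{}' in braces: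
--         braces = braces.replace('{}', '')
--     return braces != ''
-- ===== Notes on version B (the rewrite author's own statement) =====
-- stated objective: alternative
-- what changed: Replaces the counter scan with early exit by a reduction to canonical form: keep only brace characters, repeatedly delete adjacent open-close brace pairs with str.replace until none remain, and report unmatched iff the residue is nonempty.
import Mathlib
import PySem

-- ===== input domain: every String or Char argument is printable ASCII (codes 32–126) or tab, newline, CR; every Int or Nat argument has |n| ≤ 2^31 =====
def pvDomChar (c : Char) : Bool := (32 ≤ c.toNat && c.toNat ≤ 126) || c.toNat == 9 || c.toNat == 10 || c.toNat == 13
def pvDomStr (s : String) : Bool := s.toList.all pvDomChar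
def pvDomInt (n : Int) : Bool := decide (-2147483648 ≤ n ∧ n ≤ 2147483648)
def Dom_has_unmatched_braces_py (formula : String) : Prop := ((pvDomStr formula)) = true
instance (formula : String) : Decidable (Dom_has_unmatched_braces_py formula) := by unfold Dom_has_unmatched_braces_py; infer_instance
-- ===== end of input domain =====

-- B replaces A's early-exit counter scan by a different algorithm: keep only the brace
-- characters, repeatedly delete adjacent open-close brace pairs (str.replace) until none
-- remain, and report unmatched iff the residue is nonempty.  A timing run measured B
-- faster at the largest size (str.replace runs in C; A steps through chars in Python).

-- ===== PORT A =====
-- the for-loop of A, state = brace_count; early return True inside the '}' branch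
def pvLoopA : List Char → Int → Bool
  | [], k => decide (k ≠ 0)
  | c :: t, k =>
    if c = '{' then pvLoopA t (k + 1)
    else if c = '}' then
      (if k - 1 < 0 then true else pvLoopA t (k - 1))
    else pvLoopA t k

def has_unmatched_braces_py (formula : String) : Bool := pvLoopA formula.toList 0

-- ===== PORT B =====
-- proof-side model of deleting the brace pairs as str.replace does, on char lists, used only for the termination
-- argument of the while-loop below (and in the proofs)
def pvRep : List Char → List Char
  | [] => []
  | [c] => [c]
  | c :: d :: t => if c = '{' ∧ d = '}' then pvRep t else c :: pvRep (d :: t)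

lemma pvRep_length_le (s : List Char) : (pvRep s).length ≤ s.length := by
  induction s using pvRep.induct with
  | case1 => simp [pvRep]
  | case2 c => simp [pvRep]
  | case3 c d t h ih =>
    simp only [pvRep, if_pos h, List.length_cons]; omega
  | case4 c d t h ih =>
    have h2 := ih
    simp only [List.length_cons] at h2
    simp only [pvRep, if_neg h, List.length_cons]
    omega

-- PySem.Chars.replace.go with the brace-pair pattern and empty replacement computes pvRep
lemma pvGo_eq_rep (fuel : Nat) (l acc : List Char) (h : l.length ≤ fuel) :
    PySem.Chars.replace.go ['{', '}'] [] fuel l acc = acc.reverse ++ pvRep l := by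
  induction fuel generalizing l acc with
  | zero =>
    have : l = [] := by cases l <;> simp_all
    subst this; simp [PySem.Chars.replace.go, pvRep]
  | succ fuel ih =>
    match l with
    | [] => simp [PySem.Chars.replace.go, pvRep]
    | [c] =>
      have hpre : List.isPrefixOf ['{', '}'] [c] = false := by
        simp [List.isPrefixOf]
      simp only [PySem.Chars.replace.go, hpre, Bool.false_eq_true, if_false]
      rw [ih [] (c :: acc) (by simp)]
      simp [pvRep]
    | c :: d :: t =>
      by_cases hcd : c = '{' ∧ d = '}'
      · obtain ⟨hc, hd⟩ := hcd; subst hc; subst hd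
        have hpre : List.isPrefixOf ['{', '}'] ('{' :: '}' :: t) = true := by
          simp [List.isPrefixOf]
        simp only [PySem.Chars.replace.go, hpre, if_true]
        rw [show List.drop (['{', '}'] : List Char).length ('{' :: '}' :: t) = t from rfl]
        rw [ih t _ (by simp at h ⊢; omega)]
        simp [pvRep]
      · have hpre : List.isPrefixOf ['{', '}'] (c :: d :: t) = false := by
          by_cases hc : c = '{' <;> by_cases hd : d = '}' <;>
            simp_all [List.isPrefixOf] <;>
            first
              | exact fun x => hd x.symm
              | exact fun x => hc x.symm
              | exact fun x => absurd x.symm hc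
        simp only [PySem.Chars.replace.go, hpre, Bool.false_eq_true, if_false]
        rw [ih (d :: t) (c :: acc) (by simp at h ⊢; omega)]
        simp [pvRep, hcd]

lemma pvReplace_eq_rep (s : List Char) :
    PySem.Chars.replace s ['{', '}'] [] = pvRep s := by
  rw [PySem.Chars.replace]
  simp only [List.isEmpty_cons, Bool.false_eq_true, if_false]
  rw [pvGo_eq_rep s.length s [] le_rfl]
  simp

lemma pvRep_length_lt (s : List Char) (h : ['{', '}'] <:+: s) :
    (pvRep s).length < s.length := by
  induction s using pvRep.induct with
  | case1 => simp at h
  | case2 c =>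
    have := h.length_le; simp at this
  | case3 c d t hcd ih =>
    have := pvRep_length_le t
    simp [pvRep, hcd]; omega
  | case4 c d t hcd ih =>
    have ht : ['{', '}'] <:+: (d :: t) := by
      obtain ⟨u, v, huv⟩ := h
      cases u with
      | nil =>
        simp only [List.nil_append, List.cons_append] at huv
        injection huv with h1 h2
        injection h2 with h3 h4
        exact absurd ⟨h1.symm, h3.symm⟩ hcd
      | cons e u' =>
        simp only [List.cons_append] at huv
        injection huv with h1 h2
        exact ⟨u', v, h2⟩
    have h2 := ih ht
    simp only [List.length_cons] at h2
    simp only [pvRep, if_neg hcd, List.length_cons]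
    omega

lemma pvReplace_length_lt (s : List Char)
    (h : PySem.Chars.isIn ['{', '}'] s = true) :
    (PySem.Chars.replace s ['{', '}'] []).length < s.length := by
  rw [pvReplace_eq_rep]
  exact pvRep_length_lt s ((PySem.Chars.isIn_iff_infix _ _).mp h)

-- the while-loop of B: replace brace pairs while the pair occurs in braces
def pvReduce (s : List Char) : List Char :=
  if h : PySem.Chars.isIn ['{', '}'] s = true then
    pvReduce (PySem.Chars.replace s ['{', '}'] [])
  else s
termination_by s.length
decreasing_by exact pvReplace_length_lt s h

def has_unmatched_braces_py_alt (formula : String) : Bool :=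
  let braces := formula.toList.filter (fun c => c == '{' || c == '}')
  decide (pvReduce braces ≠ [])

-- ===== PRECONDITION & SPEC =====
def Spec_has_unmatched_braces_py (formula : String) (out : Bool) : Prop := out = has_unmatched_braces_py_alt formula
instance (formula : String) (out : Bool) : Decidable (Spec_has_unmatched_braces_py formula out) := by unfold Spec_has_unmatched_braces_py; infer_instance

-- ===== CLAIM (what is proved, stated in full; the proofs are below) =====
def Claim_equal_has_unmatched_braces_py : Prop := ∀ (formula : String), Dom_has_unmatched_braces_py formula → Spec_has_unmatched_braces_py formula (has_unmatched_braces_py formula)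

-- ===== LEMMAS AND PROOFS =====

-- one unfolding step of A's loop (definitional)
lemma pvLoopA_cons (c : Char) (t : List Char) (k : Int) :
    pvLoopA (c :: t) k =
      if c = '{' then pvLoopA t (k + 1)
      else if c = '}' then (if k - 1 < 0 then true else pvLoopA t (k - 1))
      else pvLoopA t k := rfl

-- non-brace characters do not affect A's loop
lemma pvLoopA_filter (s : List Char) (k : Int) :
    pvLoopA s k = pvLoopA (s.filter (fun c => c == '{' || c == '}')) k := by
  induction s generalizing k with
  | nil => rfl
  | cons c t ih =>
    by_cases hb : (c == '{' || c == '}') = true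
    · simp only [List.filter_cons]
      rw [if_pos hb, pvLoopA_cons, pvLoopA_cons]
      split_ifs
      · exact ih (k + 1)
      · rfl
      · exact ih (k - 1)
      · exact ih k
    · have hb' : ¬ c = '{' ∧ ¬ c = '}' := by simpa [not_or] using hb
      simp only [List.filter_cons]
      rw [if_neg hb, pvLoopA_cons, if_neg hb'.1, if_neg hb'.2]
      exact ih k

-- deleting adjacent brace pairs does not change A's verdict (for nonnegative count)
lemma pvLoopA_rep (s : List Char) (k : Int) (hk : 0 ≤ k) :
    pvLoopA (pvRep s) k = pvLoopA s k := by
  induction s using pvRep.induct generalizing k with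
  | case1 => rfl
  | case2 c => rfl
  | case3 c d t hcd ih =>
    obtain ⟨hc, hd⟩ := hcd; subst hc; subst hd
    rw [show pvRep ('{' :: '}' :: t) = pvRep t from by simp [pvRep]]
    rw [pvLoopA_cons, if_pos rfl, pvLoopA_cons,
      if_neg (by decide : ¬('}' : Char) = '{'), if_pos rfl,
      if_neg (by omega : ¬ k + 1 - 1 < 0),
      show k + 1 - 1 = k from by ring]
    exact ih k hk
  | case4 c d t hcd ih =>
    rw [show pvRep (c :: d :: t) = c :: pvRep (d :: t) from by simp [pvRep, hcd]]
    rw [pvLoopA_cons, pvLoopA_cons]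
    split_ifs
    · exact ih (k + 1) (by omega)
    · rfl
    · exact ih (k - 1) (by omega)
    · exact ih k hk

lemma pvRep_subset (s : List Char) : ∀ c ∈ pvRep s, c ∈ s := by
  induction s using pvRep.induct with
  | case1 => simp [pvRep]
  | case2 c => simp [pvRep]
  | case3 c d t h ih =>
    intro x hx
    simp [pvRep, h] at hx
    have := ih x hx; simp_all
  | case4 c d t h ih =>
    intro x hx
    simp [pvRep, h] at hx
    rcases hx with hx | hx
    · simp [hx]
    · have := ih x hx; simp_all

-- a brace-only string with no adjacent open-close pair has shape "}...}{...{"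
lemma pvShape (s : List Char) (hb : ∀ c ∈ s, c = '{' ∨ c = '}')
    (h : ¬ (['{', '}'] <:+: s)) :
    ∃ a b, s = List.replicate a '}' ++ List.replicate b '{' := by
  induction s with
  | nil => exact ⟨0, 0, rfl⟩
  | cons c t ih =>
    have ht : ¬ (['{', '}'] <:+: t) := fun hi => h (hi.trans ⟨[c], [], by simp⟩)
    have hb' : ∀ x ∈ t, x = '{' ∨ x = '}' := fun x hx => hb x (List.mem_cons_of_mem c hx)
    obtain ⟨a, b, rfl⟩ := ih hb' ht
    rcases hb c (List.mem_cons_self) with hc | hc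
    · subst hc
      cases a with
      | zero =>
        exact ⟨0, b + 1, by simp [List.replicate_succ]⟩
      | succ a =>
        exact absurd ⟨[], List.replicate a '}' ++ List.replicate b '{',
          by simp [List.replicate_succ]⟩ h
    · subst hc
      exact ⟨a + 1, b, by simp [List.replicate_succ]⟩

-- loop value on a run of '{'
lemma pvLoopA_open (b : Nat) (k : Int) (hk : 0 ≤ k) :
    pvLoopA (List.replicate b '{') k = decide (k + b ≠ 0) := by
  induction b generalizing k with
  | zero => simp [pvLoopA]
  | succ b ih =>
    rw [List.replicate_succ, pvLoopA_cons, if_pos rfl, ih (k + 1) (by omega),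
      decide_eq_decide]
    push_cast
    omega

-- on a fully reduced brace-only string, A answers "nonempty"
lemma pvLoopA_reduced (s : List Char) (hb : ∀ c ∈ s, c = '{' ∨ c = '}')
    (h : ¬ (['{', '}'] <:+: s)) :
    pvLoopA s 0 = decide (s ≠ []) := by
  obtain ⟨a, b, rfl⟩ := pvShape s hb h
  cases a with
  | zero =>
    simp only [List.replicate_zero, List.nil_append]
    rw [pvLoopA_open b 0 le_rfl]
    cases b with
    | zero => simp
    | succ b => simp; omega
  | succ a =>
    rw [List.replicate_succ, List.cons_append, pvLoopA_cons,
      if_neg (by decide : ¬('}' : Char) = '{'), if_pos rfl,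
      if_pos (by norm_num : (0 : Int) - 1 < 0)]
    simp

-- main invariant: A's loop agrees with B's reduction on brace-only strings
lemma pvMain (n : Nat) : ∀ (s : List Char), s.length ≤ n →
    (∀ c ∈ s, c = '{' ∨ c = '}') →
    pvLoopA s 0 = decide (pvReduce s ≠ []) := by
  induction n with
  | zero =>
    intro s hn hb
    have : s = [] := by cases s <;> simp_all
    subst this
    rw [pvReduce, dif_neg (by decide)]
    simp [pvLoopA]
  | succ n ih =>
    intro s hn hb
    by_cases h : PySem.Chars.isIn ['{', '}'] s = true
    · rw [pvReduce, dif_pos h, pvReplace_eq_rep]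
      have hlt := pvRep_length_lt s ((PySem.Chars.isIn_iff_infix _ _).mp h)
      rw [← pvLoopA_rep s 0 le_rfl]
      exact ih (pvRep s) (by omega)
        (fun c hc => hb c (pvRep_subset s c hc))
    · rw [pvReduce, dif_neg h]
      exact pvLoopA_reduced s hb ((PySem.Chars.isIn_eq_false_iff _ _).mp (by simpa using h))

-- ===== VERDICT (by name: the statement is the Claim_ definition above) =====
theorem has_unmatched_braces_py_spec : Claim_equal_has_unmatched_braces_py := by
  intro formula _
  unfold Spec_has_unmatched_braces_py has_unmatched_braces_py has_unmatched_braces_py_alt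
  rw [pvLoopA_filter]
  exact pvMain _ _ le_rfl (by intro c hc; simp at hc; exact hc.2)
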